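-- pv_equiv track=rewrite | github.com/Ravichandran-Arumugadas/BUT-Informatique | Première année en BUT Informatique/S1.02 - Comparaison d'approches algorithmiques/community_detection.py | is_a_community
-- ===== SOURCE A (Python) =====
-- def are_friends(network,person1, person2):
--
--     """
--     Cette fonction are_friends retourne True si les deux personnes sont amies, et False sinon
--
--     :param network: un dictionnaire dont les clés sont les prénoms des personnes et les valeurs des tableaux contenant la liste des amis de la personne
--     :type network: list
--     :param person1: le prénom de la personne dont on cherche le lien d'amitié avec l'autre personne
--     :type person1: str
--     :param person2: le prénom de la personne dont on cherche le lien d'amitié avec l'autre personne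
--     :type person2: str
--     :return: True si les deux sont amies sinon False
--
--     """
--     if person1 in network and person2 in network:   #condition, on regarde si les deux personnes sont dans le reseau
--         if person2 in network[person1]:     #condition, si la personne2 se trouve dans la liste des amis de la personne1
--             return True
--     return  False
--
-- def is_a_community(network, group):
--
--     """
--     Cette fonction is_a_community retourne True si ce groupe est une communauté, et False sinon
--
--     :param network: un dictionnaire dont les clés sont les prénoms des personnes et les valeurs des tableaux contenant la liste des amis de la personne
--     :type network: list
--     :param group: un tableau de personnes
--     :type group: list
--     :return: retourne True si ce groupe est une communauté, et False sinon
--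
--     """
--     i = 0    #initialisation de la boucle
--     while i < len(group):   #on parcourt tous les éléments du group
--         j = 0
--         while j < len(group) and group[i] != group[j]:   #il s'agit de ne pas comparer la même personne quand on parcourt le même groupe
--             if not are_friends(network, group[i], group[j]):
--                 return False
--             j+=1
--         i+=1
--     return True
-- ===== SOURCE B (Python) =====
-- def are_friends(network, person1, person2):
--     if person1 in network and person2 in network:
--         if person2 in network[person1]:
--             return True
--     return False
--
--
-- def is_a_community(network, group):
--     seen = []
--     for person in group:
--         if person in seen:
--             continue
--         if not all(are_friends(network, person, other) for other in seen):
--             return False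
--         seen.append(person)
--     return True
-- ===== Notes on version B (the rewrite author's own statement) =====
-- stated objective: simpler
-- what changed: A re-scans the group with nested index-based while loops, re-checking the prefix before the first occurrence of each person (repeating all checks for duplicates); B makes a single forward pass keeping a 'seen' accumulator of distinct people, skipping duplicates and checking each newcomer against the seen members only.
import Mathlib
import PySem

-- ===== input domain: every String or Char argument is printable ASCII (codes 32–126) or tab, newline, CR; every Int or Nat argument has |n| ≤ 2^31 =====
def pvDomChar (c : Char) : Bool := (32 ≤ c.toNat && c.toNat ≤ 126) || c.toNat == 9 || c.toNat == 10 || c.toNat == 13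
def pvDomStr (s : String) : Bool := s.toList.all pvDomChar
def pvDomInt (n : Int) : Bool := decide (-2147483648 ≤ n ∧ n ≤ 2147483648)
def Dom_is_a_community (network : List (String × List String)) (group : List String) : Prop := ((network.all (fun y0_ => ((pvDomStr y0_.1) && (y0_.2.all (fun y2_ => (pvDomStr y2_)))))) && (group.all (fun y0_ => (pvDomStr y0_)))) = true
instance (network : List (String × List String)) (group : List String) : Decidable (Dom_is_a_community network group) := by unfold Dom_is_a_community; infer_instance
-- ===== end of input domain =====

-- B replaces A's index-based nested while loops (which re-scan the group prefix up to the
-- first occurrence of each person, repeating work for duplicates) by a single forward pass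
-- keeping an accumulator `seen` of the distinct people already processed; objective: simpler.

-- ===== PORT A =====
-- shared helper (both Pythons define the identical are_friends)
def are_friends (network : List (String × List String)) (person1 person2 : String) : Bool :=
  if (PySem.Dict.mk network).contains person1 && (PySem.Dict.mk network).contains person2 then
    if ((PySem.Dict.mk network).getD person1 []).contains person2 then true
    else false
  else false

-- inner 'while j < len(group) and group[i] != group[j]' loop
def is_a_community_inner (network : List (String × List String)) (group : List String)
    (i j : Nat) : Bool :=
  if j < group.length ∧ group.getD i "" ≠ group.getD j "" then
    if !are_friends network (group.getD i "") (group.getD j "") then false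
    else is_a_community_inner network group i (j + 1)
  else true
termination_by group.length - j
decreasing_by omega

-- outer 'while i < len(group)' loop
def is_a_community_outer (network : List (String × List String)) (group : List String)
    (i : Nat) : Bool :=
  if i < group.length then
    if is_a_community_inner network group i 0 = false then false
    else is_a_community_outer network group (i + 1)
  else true
termination_by group.length - i
decreasing_by omega

def is_a_community (network : List (String × List String)) (group : List String) : Bool :=
  is_a_community_outer network group 0

-- ===== PORT B =====
def is_a_community_alt_go (network : List (String × List String))
    (seen rest : List String) : Bool :=
  match rest with
  | [] => true
  | person :: rest' =>
    if seen.contains person then is_a_community_alt_go network seen rest'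
    else if seen.all (fun other => are_friends network person other) then
      is_a_community_alt_go network (seen ++ [person]) rest'
    else false

def is_a_community_alt (network : List (String × List String)) (group : List String) : Bool :=
  is_a_community_alt_go network [] group

-- ===== PRECONDITION & SPEC =====
def Spec_is_a_community (network : List (String × List String)) (group : List String) (out : Bool) : Prop := out = is_a_community_alt network group
instance (network : List (String × List String)) (group : List String) (out : Bool) : Decidable (Spec_is_a_community network group out) := by unfold Spec_is_a_community; infer_instance

-- ===== CLAIM (what is proved, stated in full; the proofs are below) =====
def Claim_equal_is_a_community : Prop := ∀ (network : List (String × List String)) (group : List String), Dom_is_a_community network group → Spec_is_a_community network group (is_a_community network group)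

-- ===== LEMMAS AND PROOFS =====

-- the common characterisation: for each person p of the group, every element of the
-- prefix before the first occurrence of p must be a friend of p
def communityCheck (network : List (String × List String)) (group : List String)
    (p : String) : Bool :=
  (group.takeWhile (fun q => p ≠ q)).all (fun q => are_friends network p q)

theorem inner_eq (network : List (String × List String)) (group : List String)
    (p : String) (i j : Nat) (hip : group.getD i "" = p) :
    is_a_community_inner network group i j =
      ((group.drop j).takeWhile (fun q => p ≠ q)).all
        (fun q => are_friends network p q) := by
  rw [is_a_community_inner, hip]
  split
  · next hc =>
    obtain ⟨hj, hne⟩ := hc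
    rw [inner_eq network group p i (j + 1) hip, List.drop_eq_getElem_cons hj,
      List.takeWhile_cons, List.getD_eq_getElem _ _ hj]
    rw [List.getD_eq_getElem _ _ hj] at hne
    simp only [hne, ne_eq, not_false_eq_true, decide_true, if_true, List.all_cons]
    cases h : are_friends network p group[j] <;> simp
  · next hc =>
    rw [Classical.not_and_iff_not_or_not, not_not] at hc
    by_cases hj : j < group.length
    · have hpe : p = group[j] := by
        rw [← List.getD_eq_getElem _ "" hj]
        tauto
      rw [List.drop_eq_getElem_cons hj, List.takeWhile_cons]
      simp [hpe]
    · rw [List.drop_eq_nil_of_le (by omega)]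
      simp
termination_by group.length - j
decreasing_by omega

theorem outer_eq (network : List (String × List String)) (group : List String)
    (i : Nat) :
    is_a_community_outer network group i =
      (group.drop i).all (communityCheck network group) := by
  rw [is_a_community_outer]
  split
  · next hi =>
    rw [List.drop_eq_getElem_cons hi, List.all_cons]
    have hcc : communityCheck network group group[i] =
        is_a_community_inner network group i 0 := by
      rw [inner_eq network group group[i] i 0 (List.getD_eq_getElem _ _ hi)]
      simp [communityCheck]
    rw [outer_eq network group (i + 1)]
    cases h : is_a_community_inner network group i 0 <;> simp [h, hcc]
  · next hi =>
    rw [List.drop_eq_nil_of_le (by omega)]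
    simp
termination_by group.length - i
decreasing_by omega

theorem all_congr_mem {α : Type} (a b : List α) (f : α → Bool)
    (h : ∀ x, x ∈ a ↔ x ∈ b) : a.all f = b.all f := by
  rw [Bool.eq_iff_iff, List.all_eq_true, List.all_eq_true]
  constructor
  · intro H x hx
    exact H x ((h x).mpr hx)
  · intro H x hx
    exact H x ((h x).mp hx)

theorem alt_go_eq (network : List (String × List String)) (group : List String)
    (rest seen pre : List String)
    (hsplit : group = pre ++ rest)
    (hmem : ∀ x, x ∈ seen ↔ x ∈ pre)
    (hpre : ∀ p ∈ pre, communityCheck network group p = true) :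
    is_a_community_alt_go network seen rest =
      rest.all (communityCheck network group) := by
  match rest with
  | [] => simp [is_a_community_alt_go]
  | p :: rest' =>
    rw [is_a_community_alt_go]
    by_cases hp : p ∈ seen
    · have hppre : p ∈ pre := (hmem p).mp hp
      have hc : seen.contains p = true := by simpa using hp
      simp only [hc, if_pos]
      rw [alt_go_eq network group rest' seen (pre ++ [p])
        (by simpa using hsplit)
        (by intro x
            constructor
            · intro hx
              exact List.mem_append.mpr (Or.inl ((hmem x).mp hx))
            · intro hx
              rcases List.mem_append.mp hx with h1 | h1
              · exact (hmem x).mpr h1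
              · rw [List.mem_singleton] at h1
                rw [h1]
                exact hp)
        (by intro q hq
            rcases List.mem_append.mp hq with h1 | h1
            · exact hpre q h1
            · rw [List.mem_singleton] at h1
              rw [h1]
              exact hpre p hppre)]
      rw [List.all_cons, hpre p hppre, Bool.true_and]
    · have hnp : p ∉ pre := fun h => hp ((hmem p).mpr h)
      have hc : seen.contains p = false := by simpa using hp
      have hcc : communityCheck network group p =
          seen.all (fun other => are_friends network p other) := by
        unfold communityCheck
        rw [hsplit, List.takeWhile_append_of_pos
          (by intro x hx; simp; exact fun h => hnp (h ▸ hx)),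
          List.takeWhile_cons]
        rw [if_neg (by simp), List.append_nil]
        exact (all_congr_mem _ _ _ (fun x => (hmem x).symm))
      simp only [hc, Bool.false_eq_true, if_neg, not_false_eq_true]
      cases h : seen.all (fun other => are_friends network p other)
      · simp only [h, Bool.false_eq_true, if_neg, not_false_eq_true,
          List.all_cons, hcc, Bool.false_and]
      · rw [if_pos rfl]
        rw [alt_go_eq network group rest' (seen ++ [p]) (pre ++ [p])
          (by simpa using hsplit)
          (by intro x; simp [hmem x])
          (by intro q hq
              rcases List.mem_append.mp hq with h1 | h1
              · exact hpre q h1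
              · rw [List.mem_singleton] at h1
                rw [h1, hcc]
                exact h)]
        rw [List.all_cons, hcc, h, Bool.true_and]
-- ===== VERDICT (by name: the statement is the Claim_ definition above) =====
theorem is_a_community_spec : Claim_equal_is_a_community := by
  intro network group _
  unfold Spec_is_a_community is_a_community is_a_community_alt
  rw [outer_eq, alt_go_eq network group group [] [] rfl (by simp) (by simp)]
  simp
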